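-- pv_equiv track=rewrite | github.com/TrueMichato/Harry-Potter-DS-Project | Code/dynamic_plots.py | create_dynamic_connections_db
-- ===== SOURCE A (Python) =====
-- def reverse_dict(dict_pair_sentences: dict) -> dict:
--     """
--     Reverse the keys and values of a dictionary where the values are lists of sentences.
--
--     Args:
--         dict_pair_sentences (dict): A dictionary where the keys are IDs and the values are lists of sentences.
--
--     Returns:
--         dict: A dictionary where the keys are sentences and the values are lists of IDs.
--
--     """
--     dict_sentence_pairs = {}
--     for ids, sentences in dict_pair_sentences.items():
--         for sentence in sentences:
--             if sentence in dict_sentence_pairs: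
--                 dict_sentence_pairs[sentence].append(ids)
--             else:
--                 dict_sentence_pairs[sentence] = [ids]
--     return dict_sentence_pairs
--
-- def create_dynamic_connections_db(pair_sentences: dict) -> list:
--     """
--     Create dynamic connections database based on pair_sentences.
--     This database represents the changes in connections between characters as the books progress.
--
--     Args:
--         pair_sentences (dict): A dictionary containing pairs of sentences and their corresponding IDs.
--
--     Returns:
--         list: A list of tuples representing the dynamic connections database. Each tuple contains a sentence and a dictionary of connections.
--
--     """
--     dict_pair_sentences = reverse_dict(pair_sentences)
--     dict_pair_sentences_list = sorted(
--         [(sentence, ids) for sentence, ids in dict_pair_sentences.items()],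
--         key=lambda x: x[0],
--     )
--     temp_connections = {}
--     dynamic_connections = []
--     for sentence, ids in dict_pair_sentences_list:
--         for id in ids:
--             if id in temp_connections:
--                 temp_connections[id] += 1
--             else:
--                 temp_connections[id] = 1
--         dynamic_connections.append((sentence, temp_connections.copy()))
--     return dynamic_connections
-- ===== SOURCE B (Python) =====
-- def reverse_dict(dict_pair_sentences):
--     dict_sentence_pairs = {}
--     for ids, sentences in dict_pair_sentences.items():
--         for sentence in sentences:
--             if sentence in dict_sentence_pairs:
--                 dict_sentence_pairs[sentence].append(ids)
--             else:
--                 dict_sentence_pairs[sentence] = [ids]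
--     return dict_sentence_pairs
--
--
-- def _prefix_counts(prefix):
--     counts = {}
--     for _, ids in prefix:
--         for i in ids:
--             counts[i] = counts.get(i, 0) + 1
--     return counts
--
--
-- def create_dynamic_connections_db(pair_sentences):
--     items = sorted(reverse_dict(pair_sentences).items(), key=lambda x: x[0])
--     return [(items[k][0], _prefix_counts(items[:k + 1])) for k in range(len(items))]
-- ===== Notes on version B (the rewrite author's own statement) =====
-- stated objective: alternative
-- what changed: B drops A's running counter with a per-sentence dict copy and instead recomputes each snapshot independently, counting ids from scratch over the sorted prefix items[:k+1] for every index k.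
import Mathlib
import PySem

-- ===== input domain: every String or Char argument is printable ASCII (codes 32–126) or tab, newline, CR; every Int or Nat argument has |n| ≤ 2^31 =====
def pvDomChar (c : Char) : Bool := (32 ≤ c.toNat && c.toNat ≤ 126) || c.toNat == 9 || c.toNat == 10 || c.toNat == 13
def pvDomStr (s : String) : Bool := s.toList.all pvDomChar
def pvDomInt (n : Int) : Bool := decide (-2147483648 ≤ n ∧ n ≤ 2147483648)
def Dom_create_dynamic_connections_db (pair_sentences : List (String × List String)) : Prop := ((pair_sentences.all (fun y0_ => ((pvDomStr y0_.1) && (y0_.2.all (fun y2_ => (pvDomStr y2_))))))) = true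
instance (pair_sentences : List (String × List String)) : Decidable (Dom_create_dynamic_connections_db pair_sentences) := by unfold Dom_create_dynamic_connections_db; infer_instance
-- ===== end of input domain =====

-- B replaces A's running counter (with a dict copy per sentence) by an independent
-- from-scratch recount of each sorted prefix; same result, alternative decomposition.

-- ===== PORT A =====
-- helper reverse_dict (shared verbatim by Source A and Source B)
def pvReverseDict (d : PySem.Dict String (List String)) : PySem.Dict String (List String) :=
  d.items.foldl
    (fun acc p =>
      p.2.foldl
        (fun acc sentence =>
          if acc.contains sentence then acc.modify sentence [] (fun l => l ++ [p.1])
          else acc.insert sentence [p.1])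
        acc)
    PySem.Dict.empty

def create_dynamic_connections_db (pair_sentences : List (String × List String)) : List (String × (List (String × Int))) :=
  let dict_pair_sentences := pvReverseDict (PySem.Dict.ofList pair_sentences)
  let dict_pair_sentences_list := PySem.List.sorted dict_pair_sentences.items (fun x => x.1) false
  (dict_pair_sentences_list.foldl
    (fun (st : PySem.Dict String Int × List (String × List (String × Int))) si =>
      let temp :=
        si.2.foldl
          (fun t id => if t.contains id then t.modify id 0 (· + 1) else t.insert id 1)
          st.1
      (temp, st.2 ++ [(si.1, temp.items)]))
    (PySem.Dict.empty, [])).2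

-- ===== PORT B =====
-- helper _prefix_counts: count ids of a prefix from scratch
def pvPrefixCounts (pfx : List (String × List String)) : PySem.Dict String Int :=
  pfx.foldl
    (fun counts p => p.2.foldl (fun c i => c.insert i (c.getD i 0 + 1)) counts)
    PySem.Dict.empty

def create_dynamic_connections_db_alt (pair_sentences : List (String × List String)) : List (String × (List (String × Int))) :=
  let items := PySem.List.sorted (pvReverseDict (PySem.Dict.ofList pair_sentences)).items (fun x => x.1) false
  (List.range items.length).map
    (fun k => ((items.getD k ("", [])).1, (pvPrefixCounts (items.take (k + 1))).items))

-- ===== PRECONDITION & SPEC =====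
def Spec_create_dynamic_connections_db (pair_sentences : List (String × List String)) (out : List (String × (List (String × Int)))) : Prop := out = create_dynamic_connections_db_alt pair_sentences
instance (pair_sentences : List (String × List String)) (out : List (String × (List (String × Int)))) : Decidable (Spec_create_dynamic_connections_db pair_sentences out) := by unfold Spec_create_dynamic_connections_db; infer_instance

-- ===== CLAIM (what is proved, stated in full; the proofs are below) =====
def Claim_equal_create_dynamic_connections_db : Prop := ∀ (pair_sentences : List (String × List String)), Dom_create_dynamic_connections_db pair_sentences → Spec_create_dynamic_connections_db pair_sentences (create_dynamic_connections_db pair_sentences)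

-- ===== LEMMAS AND PROOFS =====

-- A's per-id update (branch on membership) equals B's unconditional re-insert.
theorem pvStepEq (d : PySem.Dict String Int) (id : String) :
    (if d.contains id then d.modify id 0 (· + 1) else d.insert id 1)
      = d.insert id (d.getD id 0 + 1) := by
  by_cases h : d.contains id = true
  · simp [h, PySem.Dict.modify]
  · simp only [Bool.not_eq_true] at h
    rw [if_neg (by simp [h]), PySem.Dict.getD_of_not_contains _ _ h]
    norm_num

-- counting a prefix starting from an accumulator
def pvCountsFrom (t : PySem.Dict String Int) (pfx : List (String × List String)) : PySem.Dict String Int :=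
  pfx.foldl (fun counts p => p.2.foldl (fun c i => c.insert i (c.getD i 0 + 1)) counts) t

theorem pvInnerEq (ids : List String) (t : PySem.Dict String Int) :
    ids.foldl (fun t id => if t.contains id then t.modify id 0 (· + 1) else t.insert id 1) t
      = ids.foldl (fun c i => c.insert i (c.getD i 0 + 1)) t := by
  simp only [pvStepEq]

theorem pvLoopEq (lst : List (String × List String)) (t : PySem.Dict String Int)
    (acc : List (String × List (String × Int))) :
    (lst.foldl
      (fun (st : PySem.Dict String Int × List (String × List (String × Int))) si =>
        let temp :=
          si.2.foldl
            (fun t id => if t.contains id then t.modify id 0 (· + 1) else t.insert id 1)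
            st.1
        (temp, st.2 ++ [(si.1, temp.items)]))
      (t, acc)).2
      = acc ++ (List.range lst.length).map
          (fun k => ((lst.getD k ("", [])).1, (pvCountsFrom t (lst.take (k + 1))).items)) := by
  induction lst generalizing t acc with
  | nil => simp
  | cons hd tl ih =>
    simp only [List.foldl_cons]
    rw [ih]
    simp [List.range_succ_eq_map, Function.comp_def, pvCountsFrom, pvInnerEq,
      List.take_succ_cons]

-- ===== VERDICT (by name: the statement is the Claim_ definition above) =====
theorem create_dynamic_connections_db_spec : Claim_equal_create_dynamic_connections_db := by
  intro pair_sentences _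
  unfold Spec_create_dynamic_connections_db
  unfold create_dynamic_connections_db create_dynamic_connections_db_alt
  rw [pvLoopEq]
  rfl
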